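-- pv_equiv track=rewrite | github.com/timmyshun/Python2.7 | Lottery/Lottery_Filter.py | filter_5
-- ===== SOURCE A (Python) =====
-- def filter_5(redBall,blueBall):
--     """规则5:限定三区比"""
--     sum_1 = 0
--     sum_2 = 0
--     sum_3 = 0
--     for red in redBall:
--         if red <12 :
--             sum_1 += 1
--         elif red < 23:
--             sum_2 += 1
--         else:
--             sum_3 += 1
--     a = max([sum_1,sum_2,sum_3])
--     if a > 4:
--         return False
--     return True
-- ===== SOURCE B (Python) =====
-- def filter_5(redBall, blueBall):
--     """规则5:限定三区比 — recomputed as three independent zone counts and an explicit max."""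
--     z1 = sum(1 for r in redBall if r < 12)
--     z2 = sum(1 for r in redBall if 12 <= r < 23)
--     z3 = sum(1 for r in redBall if r >= 23)
--     return max(z1, z2, z3) <= 4
-- ===== Notes on version B (the rewrite author's own statement) =====
-- stated objective: idiomatic
-- what changed: Replaces the single branchy accumulating loop with three independent zone-count scans (one per zone) combined by an explicit max <= 4 comparison.
import Mathlib
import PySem

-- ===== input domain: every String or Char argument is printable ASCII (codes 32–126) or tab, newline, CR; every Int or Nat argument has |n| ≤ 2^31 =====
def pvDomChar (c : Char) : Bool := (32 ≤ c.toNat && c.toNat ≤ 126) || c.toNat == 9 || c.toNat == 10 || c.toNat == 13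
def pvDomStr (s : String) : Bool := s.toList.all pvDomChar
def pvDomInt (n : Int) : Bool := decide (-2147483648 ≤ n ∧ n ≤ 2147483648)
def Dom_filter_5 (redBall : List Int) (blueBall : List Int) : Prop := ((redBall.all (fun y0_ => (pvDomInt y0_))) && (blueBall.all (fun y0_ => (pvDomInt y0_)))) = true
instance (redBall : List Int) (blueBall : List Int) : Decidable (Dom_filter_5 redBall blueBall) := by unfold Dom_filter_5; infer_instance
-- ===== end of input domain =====

-- B replaces A's single branchy accumulating loop with three independent zone-count scans and an explicit max; same O(n), idiomatic.

-- ===== PORT A =====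
-- literal port: one fold carrying (sum_1, sum_2, sum_3), then a = max of the three, return ¬(a > 4)
def filter_5 (redBall : List Int) (blueBall : List Int) : Bool :=
  let s := redBall.foldl
    (fun (st : Int × Int × Int) red =>
      if red < 12 then (st.1 + 1, st.2.1, st.2.2)
      else if red < 23 then (st.1, st.2.1 + 1, st.2.2)
      else (st.1, st.2.1, st.2.2 + 1))
    (0, 0, 0)
  let a := max s.1 (max s.2.1 s.2.2)
  if a > 4 then false else true

-- ===== PORT B =====
-- three independent zone counts (countP = sum of the comprehension), then max ≤ 4
def filter_5_alt (redBall : List Int) (blueBall : List Int) : Bool :=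
  let z1 : Int := redBall.countP (fun r => r < 12)
  let z2 : Int := redBall.countP (fun r => 12 ≤ r ∧ r < 23)
  let z3 : Int := redBall.countP (fun r => 23 ≤ r)
  decide (max z1 (max z2 z3) ≤ 4)

-- ===== PRECONDITION & SPEC =====
def Spec_filter_5 (redBall : List Int) (blueBall : List Int) (out : Bool) : Prop := out = filter_5_alt redBall blueBall
instance (redBall : List Int) (blueBall : List Int) (out : Bool) : Decidable (Spec_filter_5 redBall blueBall out) := by unfold Spec_filter_5; infer_instance

-- ===== CLAIM (what is proved, stated in full; the proofs are below) =====
def Claim_equal_filter_5 : Prop := ∀ (redBall : List Int) (blueBall : List Int), Dom_filter_5 redBall blueBall → Spec_filter_5 redBall blueBall (filter_5 redBall blueBall)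

-- ===== LEMMAS AND PROOFS =====

-- the fold's state equals the initial state plus the three zone counts
theorem filter_5_fold_counts (l : List Int) (a b c : Int) :
    l.foldl
      (fun (st : Int × Int × Int) red =>
        if red < 12 then (st.1 + 1, st.2.1, st.2.2)
        else if red < 23 then (st.1, st.2.1 + 1, st.2.2)
        else (st.1, st.2.1, st.2.2 + 1))
      (a, b, c)
    = (a + l.countP (fun r => decide (r < 12)),
       b + l.countP (fun r => decide (12 ≤ r ∧ r < 23)),
       c + l.countP (fun r => decide (23 ≤ r))) := by
  induction l generalizing a b c with
  | nil => simp
  | cons x xs ih =>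
    simp only [List.foldl_cons]
    by_cases h1 : x < 12
    · rw [if_pos h1, ih]
      simp only [List.countP_cons, Prod.mk.injEq]
      refine ⟨?_, ?_, ?_⟩ <;>
        (simp [h1, show ¬(12 ≤ x ∧ x < 23) from by omega, show ¬(23 ≤ x) from by omega];
         try omega)
    · by_cases h2 : x < 23
      · rw [if_neg h1, if_pos h2, ih]
        simp only [List.countP_cons, Prod.mk.injEq]
        refine ⟨?_, ?_, ?_⟩ <;>
          (simp [h1, h2, show (12 ≤ x ∧ x < 23) from by omega, show ¬(23 ≤ x) from by omega];
           try omega)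
      · rw [if_neg h1, if_neg h2, ih]
        simp only [List.countP_cons, Prod.mk.injEq]
        refine ⟨?_, ?_, ?_⟩ <;>
          (simp [h1, show ¬(12 ≤ x ∧ x < 23) from by omega, show (23 ≤ x) from by omega];
           try omega)

-- ===== VERDICT (by name: the statement is the Claim_ definition above) =====
theorem filter_5_spec : Claim_equal_filter_5 := by
  intro redBall blueBall _
  unfold Spec_filter_5 filter_5 filter_5_alt
  simp only [filter_5_fold_counts, zero_add]
  split_ifs with h
  · simp at h ⊢; omega
  · simp at h ⊢; omega
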